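-- pv_equiv track=rewrite | github.com/IamMushroom/python.learn.advanced | Lesson 4/task4.27.py | is_valid_numbers
-- ===== SOURCE A (Python) =====
-- def is_valid_numbers(matrix):
--     numbers = []
--
--     for row in matrix:
--         for num in row:
--             numbers.append(num)
--
--     numbers.sort()
--     if numbers[0] != 1:
--         return False
--     else:
--         for i in range(len(numbers) - 2):
--             if numbers[i + 1] != numbers[i] + 1:
--                 return False
--
--     return True
-- ===== SOURCE B (Python) =====
-- def is_valid_numbers(matrix):
--     values = [num for row in matrix for num in row]
--     n = len(values)
--     return len(set(values)) == n and all(1 <= v <= n for v in values)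
-- ===== Notes on version B (the rewrite author's own statement) =====
-- stated objective: faster
-- what changed: B replaces A's collect-then-sort-then-scan with a one-pass set-based permutation check (n distinct values all in 1..n); Pre_ excludes only matrices with no elements, where A raises IndexError.
-- intended difference: On matrices with at least two values whose sorted values begin with exactly 1..n-1 but whose last (largest) value is not n, A returns True (its loop stops two before the end and never validates the last sorted value) while B returns False, the intended answer since the values are not the consecutive run 1..n. — e.g. on is_valid_numbers([[1, 1]]): A returns true, B returns false
import Mathlib
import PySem

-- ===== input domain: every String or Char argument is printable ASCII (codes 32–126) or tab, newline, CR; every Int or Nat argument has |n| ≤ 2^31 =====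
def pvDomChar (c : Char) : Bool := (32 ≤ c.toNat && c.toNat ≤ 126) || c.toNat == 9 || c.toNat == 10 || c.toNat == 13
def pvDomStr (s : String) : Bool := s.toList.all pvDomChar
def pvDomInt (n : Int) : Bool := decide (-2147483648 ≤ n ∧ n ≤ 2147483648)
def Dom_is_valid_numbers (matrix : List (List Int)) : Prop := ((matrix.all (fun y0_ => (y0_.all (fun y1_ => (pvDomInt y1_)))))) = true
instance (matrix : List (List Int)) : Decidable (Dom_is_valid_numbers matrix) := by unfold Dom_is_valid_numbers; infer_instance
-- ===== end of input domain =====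

-- B replaces A's collect/sort/scan with a set-based permutation check: the values are valid iff
-- they are n distinct integers all lying in 1..n. A's scan stops two before the end of the sorted
-- list, so A never validates the largest value; that difference is stated below as D_.

-- ===== PORT A =====
def is_valid_numbers (matrix : List (List Int)) : Bool :=
  -- numbers = []; for row in matrix: for num in row: numbers.append(num)
  let numbers := matrix.foldl (fun acc row => row.foldl (fun acc2 num => acc2 ++ [num]) acc) []
  -- numbers.sort()
  let numbers := PySem.List.sorted numbers (fun x => x) false
  -- if numbers[0] != 1: return False  (numbers[0] raises IndexError on an empty list: outside Pre_)
  match PySem.List.pyGet? numbers 0 with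
  | none => false
  | some first =>
    if first ≠ 1 then false
    else
      -- for i in range(len(numbers) - 2): if numbers[i + 1] != numbers[i] + 1: return False
      (PySem.List.pyRange 0 ((numbers.length : Int) - 2) 1).all (fun i =>
        match PySem.List.pyGet? numbers (i + 1), PySem.List.pyGet? numbers i with
        | some a, some b => a == b + 1
        | _, _ => false)

-- ===== PORT B =====
def is_valid_numbers_alt (matrix : List (List Int)) : Bool :=
  -- values = [num for row in matrix for num in row]
  let values := matrix.flatMap (fun row => row)
  -- n = len(values)
  let n := values.length
  -- return len(set(values)) == n and all(1 <= v <= n for v in values)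
  (PySem.Set.ofList values).length == n && values.all (fun v => 1 ≤ v && v ≤ (n : Int))

-- ===== PRECONDITION & SPEC =====
-- Pre_ excludes only matrices with no elements at all: there A's 'numbers[0]' raises IndexError.
def Pre_is_valid_numbers (matrix : List (List Int)) : Prop := matrix.flatten ≠ []
instance (matrix : List (List Int)) : Decidable (Pre_is_valid_numbers matrix) := by unfold Pre_is_valid_numbers; infer_instance
def pvWitness_is_valid_numbers : List (List Int) := [[2], [1]]

-- the values 1,2,…,k as a list (used by D_ to state 'the sorted values begin with 1..n-1')
def pref (n : Nat) : List Int := List.map (fun j : Nat => (j : Int) + 1) (List.range n)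

-- On matrices with ≥ 2 values whose sorted values begin with exactly 1,2,…,n-1 but whose last
-- (largest) value is not n, A returns True (its loop stops two before the end and never validates
-- the last sorted value) while B returns False, the intended answer: the values are not the
-- consecutive run 1..n.
def D_is_valid_numbers (matrix : List (List Int)) : Prop :=
  2 ≤ matrix.flatten.length ∧
  (matrix.flatten.mergeSort (fun a b => decide (a ≤ b))).take (matrix.flatten.length - 1) =
    pref (matrix.flatten.length - 1) ∧
  (matrix.flatten.mergeSort (fun a b => decide (a ≤ b))).drop (matrix.flatten.length - 1) ≠
    [(matrix.flatten.length : Int)]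
instance (matrix : List (List Int)) : Decidable (D_is_valid_numbers matrix) := by unfold D_is_valid_numbers; infer_instance

def Spec_is_valid_numbers (matrix : List (List Int)) (out : Bool) : Prop := ¬ D_is_valid_numbers matrix → out = is_valid_numbers_alt matrix
instance (matrix : List (List Int)) (out : Bool) : Decidable (Spec_is_valid_numbers matrix out) := by unfold Spec_is_valid_numbers; infer_instance

def pvDiffWitness_is_valid_numbers : List (List Int) := [[1, 1]]
def pvDiffWitnessOut_is_valid_numbers : Bool × Bool := (true, false)

-- ===== CLAIM (what is proved, stated in full; the proofs are below) =====
def Claim_unchanged_is_valid_numbers : Prop := ∀ (matrix : List (List Int)), Dom_is_valid_numbers matrix → Pre_is_valid_numbers matrix → Spec_is_valid_numbers matrix (is_valid_numbers matrix)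
def Claim_changed_is_valid_numbers : Prop := Dom_is_valid_numbers (pvDiffWitness_is_valid_numbers) ∧ Pre_is_valid_numbers (pvDiffWitness_is_valid_numbers) ∧ D_is_valid_numbers (pvDiffWitness_is_valid_numbers) ∧ is_valid_numbers (pvDiffWitness_is_valid_numbers) = pvDiffWitnessOut_is_valid_numbers.1 ∧ is_valid_numbers_alt (pvDiffWitness_is_valid_numbers) = pvDiffWitnessOut_is_valid_numbers.2 ∧ pvDiffWitnessOut_is_valid_numbers.1 ≠ pvDiffWitnessOut_is_valid_numbers.2
def Claim_exact_is_valid_numbers : Prop := ∀ (matrix : List (List Int)), Dom_is_valid_numbers matrix → Pre_is_valid_numbers matrix → D_is_valid_numbers matrix → is_valid_numbers matrix ≠ is_valid_numbers_alt matrix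

-- ===== LEMMAS AND PROOFS =====

theorem flatA (matrix : List (List Int)) :
    matrix.foldl (fun acc row => row.foldl (fun acc2 num => acc2 ++ [num]) acc) [] = matrix.flatten := by
  have h := PySem.List.foldl_congr_mem matrix
      (fun acc row => row.foldl (fun acc2 num => acc2 ++ [num]) acc)
      (fun acc row => acc ++ row) []
      (fun acc x _ => PySem.List.foldl_append_singleton_eq_self ..)
  exact h.trans (by simpa using PySem.List.foldl_append_eq_flatten matrix [])

theorem ofList_len_iff (xs : List Int) :
    (PySem.Set.ofList xs).length = xs.length ↔ xs.Nodup := by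
  constructor
  · intro h
    have hperm : (PySem.Set.ofList xs).Perm xs.dedup := by
      rw [List.perm_ext_iff_of_nodup (PySem.Set.nodup_ofList xs) xs.nodup_dedup]
      intro a; simp [PySem.Set.mem_ofList, List.mem_dedup]
    have hlen : xs.dedup.length = xs.length := by rw [← hperm.length_eq, h]
    exact List.dedup_eq_self.mp ((xs.dedup_sublist).eq_of_length hlen)
  · intro h; rw [PySem.Set.ofList_eq_self_of_nodup xs h]

-- A characterization: on a nonempty flattening, A is True iff the sorted values start at 1
-- and are consecutive at every index checked by A's loop (which stops two before the end).
theorem portA (matrix : List (List Int)) (hne : matrix.flatten ≠ []) :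
    is_valid_numbers matrix = true ↔
      ((PySem.List.sorted matrix.flatten (fun x => x) false).getD 0 0 = 1 ∧
       ∀ j : Nat, j < matrix.flatten.length - 2 →
         (PySem.List.sorted matrix.flatten (fun x => x) false).getD (j+1) 0 =
         (PySem.List.sorted matrix.flatten (fun x => x) false).getD j 0 + 1) := by
  simp only [is_valid_numbers, flatA]
  set ys := PySem.List.sorted matrix.flatten (fun x => x) false with hys
  have hlen : ys.length = matrix.flatten.length := PySem.List.length_sorted ..
  have hyne : ys ≠ [] := by
    intro h; exact hne ((PySem.List.sorted_eq_nil_iff ..).mp h)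
  have hypos : 0 < ys.length := List.length_pos_iff.mpr hyne
  rw [PySem.List.pyGet?_zero, List.getElem?_eq_getElem hypos]
  simp only []
  constructor
  · intro h
    split_ifs at h with h1
    refine ⟨by rw [List.getD_eq_getElem _ _ hypos]; omega, ?_⟩
    intro j hj
    rw [List.all_eq_true] at h
    have hjmem : (j : Int) ∈ PySem.List.pyRange 0 ((ys.length : Int) - 2) 1 := by
      rw [PySem.List.mem_pyRange_one]; omega
    have := h _ hjmem
    have hj1 : j + 1 < ys.length := by omega
    have hj0 : j < ys.length := by omega
    rw [show (j : Int) + 1 = ((j + 1 : Nat) : Int) by push_cast; ring] at this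
    rw [PySem.List.pyGet?_natCast, PySem.List.pyGet?_natCast,
        List.getElem?_eq_getElem hj1, List.getElem?_eq_getElem hj0] at this
    simp only [beq_iff_eq] at this
    rw [List.getD_eq_getElem _ _ hj1, List.getD_eq_getElem _ _ hj0]
    omega
  · rintro ⟨h0, hstep⟩
    rw [List.getD_eq_getElem _ _ hypos] at h0
    rw [if_neg (by simp [h0])]
    rw [List.all_eq_true]
    intro i hi
    rw [PySem.List.mem_pyRange_one] at hi
    obtain ⟨hi0, hi2⟩ := hi
    have hj : i = ((i.toNat : Nat) : Int) := by omega
    set j := i.toNat with hjdef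
    have hjlt : j < matrix.flatten.length - 2 := by omega
    have hstep' := hstep j hjlt
    have hj1 : j + 1 < ys.length := by omega
    have hj0 : j < ys.length := by omega
    rw [List.getD_eq_getElem _ _ hj1, List.getD_eq_getElem _ _ hj0] at hstep'
    rw [hj, show ((j : Nat) : Int) + 1 = ((j + 1 : Nat) : Int) by push_cast; ring,
        PySem.List.pyGet?_natCast, PySem.List.pyGet?_natCast,
        List.getElem?_eq_getElem hj1, List.getElem?_eq_getElem hj0]
    simp only [beq_iff_eq]
    omega

-- A's condition pins the first n-1 sorted values to 1,2,…,n-1 (and says nothing about the last).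
theorem prefix_iff (ys : List Int) :
    (ys.getD 0 0 = 1 ∧ ∀ j, j < ys.length - 2 → ys.getD (j+1) 0 = ys.getD j 0 + 1) ↔
    (ys.getD 0 0 = 1 ∧ ∀ j, j < ys.length - 1 → ys.getD j 0 = (j : Int) + 1) := by
  constructor
  · rintro ⟨h0, hstep⟩
    refine ⟨h0, ?_⟩
    intro j
    induction j with
    | zero => intro _; simpa using h0
    | succ k ih =>
      intro hk
      have hk' : k < ys.length - 1 := by omega
      have := hstep k (by omega)
      have := ih hk'
      push_cast
      omega
  · rintro ⟨h0, hall⟩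
    refine ⟨h0, ?_⟩
    intro j hj
    have h1 := hall j (by omega)
    have h2 := hall (j+1) (by omega)
    push_cast at h2
    omega

theorem length_pref (n : Nat) : (pref n).length = n := by
  unfold pref; rw [List.length_map, List.length_range]

theorem mem_pref (n : Nat) (v : Int) : v ∈ pref n ↔ 1 ≤ v ∧ v ≤ (n : Int) := by
  unfold pref
  constructor
  · intro h
    obtain ⟨j, hj, rfl⟩ := List.mem_map.mp h
    have := List.mem_range.mp hj
    omega
  · rintro ⟨h1, h2⟩
    exact List.mem_map.mpr ⟨(v - 1).toNat, List.mem_range.mpr (by omega), by omega⟩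

theorem nodup_pref (n : Nat) : (pref n).Nodup := by
  unfold pref
  exact List.Nodup.map (fun a b h => by omega) (List.nodup_range ..)

theorem getD_pref (n j : Nat) (hj : j < n) : (pref n).getD j 0 = (j : Int) + 1 := by
  unfold pref
  rw [List.getD_eq_getElem _ _ (by rw [List.length_map, List.length_range]; omega)]
  rw [List.getElem_map, List.getElem_range]

theorem pref_succ (k : Nat) : pref (k + 1) = pref k ++ [(k : Int) + 1] := by
  unfold pref
  rw [List.range_succ, List.map_append]
  rfl

theorem pairwise_le_pref (n : Nat) : (pref n).Pairwise (· ≤ ·) := by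
  unfold pref
  refine List.Pairwise.map _ (fun a b hab => ?_) (List.pairwise_lt_range (n := n))
  omega

-- being a permutation of pref k = being k distinct values all in [1, k]
theorem perm_pref_iff (zs : List Int) (k : Nat) :
    zs.Perm (pref k) ↔ zs.length = k ∧ zs.Nodup ∧ ∀ v ∈ zs, 1 ≤ v ∧ v ≤ (k : Int) := by
  constructor
  · intro h
    refine ⟨by rw [h.length_eq, length_pref], h.nodup_iff.mpr (nodup_pref k), ?_⟩
    intro v hv
    exact (mem_pref k v).mp (h.mem_iff.mp hv)
  · rintro ⟨hl, hnd, hb⟩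
    have hsub : zs ⊆ pref k := fun v hv => (mem_pref k v).mpr (hb v hv)
    exact (hnd.subperm hsub).perm_of_length_le (by rw [length_pref, hl])

-- B is True exactly when the values are a permutation of 1..n
theorem portB (matrix : List (List Int)) :
    is_valid_numbers_alt matrix = true ↔ matrix.flatten.Perm (pref matrix.flatten.length) := by
  have hfm : matrix.flatMap (fun row => row) = matrix.flatten := List.flatMap_id
  simp only [is_valid_numbers_alt, hfm]
  rw [perm_pref_iff]
  simp only [Bool.and_eq_true, beq_iff_eq, List.all_eq_true, Bool.and_eq_true, decide_eq_true_eq]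
  constructor
  · rintro ⟨hl, hb⟩
    exact ⟨by trivial, (ofList_len_iff _).mp hl, fun v hv => hb v hv⟩
  · rintro ⟨_, hnd, hb⟩
    exact ⟨(ofList_len_iff _).mpr hnd, fun v hv => hb v hv⟩

-- D_'s mergeSort is the same list as the sorted list A builds (both sort the values ascending)
theorem ms_eq (xs : List Int) :
    xs.mergeSort (fun a b => decide (a ≤ b)) = PySem.List.sorted xs (fun x => x) false := by
  refine (PySem.List.sorted_id_eq_of_perm_of_pairwise xs _ (List.mergeSort_perm xs _) ?_).symm
  have h := List.pairwise_mergeSort (le := fun a b : Int => decide (a ≤ b))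
      (fun a b c hab hbc => by
        simp only [decide_eq_true_eq] at *
        omega)
      (fun a b => by
        simp only [Bool.or_eq_true, decide_eq_true_eq]
        omega) xs
  exact h.imp (fun hab => by simpa using hab)

-- 'the first n-1 entries are 1..n-1' as a statement about take
theorem take_pref_iff (ys : List Int) (n : Nat) (hlen : ys.length = n) (h1 : 1 ≤ n) :
    ys.take (n - 1) = pref (n - 1) ↔ ∀ j, j < n - 1 → ys.getD j 0 = (j : Int) + 1 := by
  constructor
  · intro h j hj
    have hjy : j < ys.length := by omega
    have hjt : j < (ys.take (n - 1)).length := by rw [List.length_take]; omega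
    have e : (ys.take (n - 1))[j]'hjt = ys[j]'hjy := List.getElem_take
    have hp := getD_pref (n - 1) j hj
    rw [List.getD_eq_getElem _ _ (by rw [length_pref]; omega)] at hp
    calc ys.getD j 0 = ys[j]'hjy := List.getD_eq_getElem _ _ hjy
      _ = (ys.take (n - 1))[j]'hjt := e.symm
      _ = (pref (n - 1))[j]'(by rw [length_pref]; omega) := List.getElem_of_eq h hjt
      _ = (j : Int) + 1 := hp
  · intro h
    apply List.ext_getElem
    · rw [List.length_take, length_pref]; omega
    · intro j hj hj'
      rw [length_pref] at hj'
      have hjy : j < ys.length := by omega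
      have hv := h j hj'
      rw [List.getD_eq_getElem _ _ hjy] at hv
      have hp := getD_pref (n - 1) j hj'
      rw [List.getD_eq_getElem _ _ (by rw [length_pref]; omega)] at hp
      rw [List.getElem_take, hv, ← hp]

-- a length-n list is pref n iff its first n-1 entries are pref (n-1) and its tail entry is n
theorem eq_prefn_split (ys : List Int) (n : Nat) (_hlen : ys.length = n) (h1 : 1 ≤ n) :
    ys = pref n ↔ (ys.take (n - 1) = pref (n - 1) ∧ ys.drop (n - 1) = [(n : Int)]) := by
  have hps : pref n = pref (n - 1) ++ [((n - 1 : Nat) : Int) + 1] := by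
    rw [← pref_succ]
    congr 1
    omega
  have hc : ((n - 1 : Nat) : Int) + 1 = (n : Int) := by omega
  constructor
  · intro h
    rw [h, hps, List.take_left' (length_pref _), List.drop_left' (length_pref _), hc]
    exact ⟨rfl, rfl⟩
  · rintro ⟨ht, hd⟩
    have h2 := List.take_append_drop (n - 1) ys
    rw [ht, hd] at h2
    rw [hps, hc]
    exact h2.symm

-- a list is a permutation of 1..n iff its ascending rearrangement IS 1..n
theorem perm_iff_sorted_eq (xs : List Int) :
    xs.Perm (pref xs.length) ↔
      PySem.List.sorted xs (fun x => x) false = pref xs.length := by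
  constructor
  · intro h
    exact PySem.List.sorted_id_eq_of_perm_of_pairwise xs _ h.symm (pairwise_le_pref _)
  · intro h
    have hp : (PySem.List.sorted xs (fun x => x) false).Perm xs := PySem.List.sorted_perm ..
    rw [h] at hp
    exact hp.symm

-- A (n ≥ 2): True iff the sorted values begin with exactly 1..n-1
theorem A_iff_take (matrix : List (List Int)) (hpre : matrix.flatten ≠ [])
    (h2 : 2 ≤ matrix.flatten.length) :
    is_valid_numbers matrix = true ↔
      (PySem.List.sorted matrix.flatten (fun x => x) false).take (matrix.flatten.length - 1) =
        pref (matrix.flatten.length - 1) := by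
  rw [portA matrix hpre]
  set ys := PySem.List.sorted matrix.flatten (fun x => x) false with hys
  have hlen : ys.length = matrix.flatten.length := PySem.List.length_sorted ..
  rw [take_pref_iff ys matrix.flatten.length hlen (by omega)]
  constructor
  · rintro ⟨h0, hstep⟩
    intro j hj
    exact ((prefix_iff ys).mp ⟨h0, fun k hk => hstep k (by omega)⟩).2 j (by omega)
  · intro hall
    have h0 : ys.getD 0 0 = 1 := by
      have := hall 0 (by omega)
      simpa using this
    refine ⟨h0, ?_⟩
    intro j hj
    exact ((prefix_iff ys).mpr ⟨h0, fun k hk => hall k (by omega)⟩).2 j (by omega)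

theorem main_eq (matrix : List (List Int)) (hpre : matrix.flatten ≠ [])
    (hnd : ¬ D_is_valid_numbers matrix) :
    is_valid_numbers matrix = is_valid_numbers_alt matrix := by
  have hxpos : 0 < matrix.flatten.length := List.length_pos_iff.mpr hpre
  by_cases h2 : 2 ≤ matrix.flatten.length
  · -- n ≥ 2
    have hms := ms_eq matrix.flatten
    have hlen : (PySem.List.sorted matrix.flatten (fun x => x) false).length =
        matrix.flatten.length := PySem.List.length_sorted ..
    have hD : D_is_valid_numbers matrix ↔
        ((PySem.List.sorted matrix.flatten (fun x => x) false).take (matrix.flatten.length - 1) =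
            pref (matrix.flatten.length - 1) ∧
         (PySem.List.sorted matrix.flatten (fun x => x) false).drop (matrix.flatten.length - 1) ≠
            [(matrix.flatten.length : Int)]) := by
      unfold D_is_valid_numbers
      rw [hms]
      constructor
      · rintro ⟨_, ht, hd⟩
        exact ⟨ht, hd⟩
      · rintro ⟨ht, hd⟩
        exact ⟨h2, ht, hd⟩
    rw [hD] at hnd
    push Not at hnd
    rw [Bool.eq_iff_iff, A_iff_take matrix hpre h2, portB matrix, perm_iff_sorted_eq,
        eq_prefn_split _ _ hlen (by omega)]
    constructor
    · intro ht
      exact ⟨ht, hnd ht⟩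
    · rintro ⟨ht, _⟩
      exact ht
  · -- n = 1: A checks the single value equals 1, and so does B
    have hone : matrix.flatten.length = 1 := by omega
    obtain ⟨a, ha⟩ := List.length_eq_one_iff.mp hone
    have hys : PySem.List.sorted matrix.flatten (fun x => x) false = [a] := by
      rw [ha]
      exact PySem.List.sorted_id_eq_of_perm_of_pairwise _ _ (by simp) (by simp)
    have hp1 : pref 1 = [(1 : Int)] := by decide
    rw [Bool.eq_iff_iff, portA matrix hpre, portB matrix]
    constructor
    · rintro ⟨h0, _⟩
      rw [hys] at h0
      simp only [List.getD_cons_zero] at h0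
      rw [ha] at *
      simp only [List.length_cons, List.length_nil] at *
      rw [h0, hp1]
    · intro hperm
      rw [ha] at hperm
      simp only [List.length_cons, List.length_nil, hp1] at hperm
      have hae : a = 1 := by
        have := List.perm_singleton.mp hperm
        simpa using this
      refine ⟨?_, fun j hj => absurd hj (by omega)⟩
      rw [hys]
      simpa using hae

theorem main_diff (matrix : List (List Int)) (hpre : matrix.flatten ≠ [])
    (hd : D_is_valid_numbers matrix) :
    is_valid_numbers matrix = true ∧ is_valid_numbers_alt matrix = false := by
  obtain ⟨h2, ht, hdne⟩ := hd
  have hms := ms_eq matrix.flatten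
  rw [hms] at ht hdne
  have hlen : (PySem.List.sorted matrix.flatten (fun x => x) false).length =
      matrix.flatten.length := PySem.List.length_sorted ..
  constructor
  · rw [A_iff_take matrix hpre h2]
    exact ht
  · rw [← Bool.not_eq_true, portB matrix, perm_iff_sorted_eq,
        eq_prefn_split _ _ hlen (by omega)]
    rintro ⟨_, hdrop⟩
    exact hdne hdrop

-- ===== VERDICT (by name: the statements are the Claim_ definitions above) =====
theorem is_valid_numbers_spec : Claim_unchanged_is_valid_numbers := by
  intro matrix _ hpre hnd
  exact main_eq matrix hpre hnd

theorem is_valid_numbers_changed : Claim_changed_is_valid_numbers := by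
  unfold Claim_changed_is_valid_numbers
  refine ⟨by decide, by decide, ?_, by decide, by decide, by decide⟩
  unfold D_is_valid_numbers
  rw [ms_eq]
  exact ⟨by decide, by decide, by decide⟩

theorem is_valid_numbers_tight : Claim_exact_is_valid_numbers := by
  intro matrix _ hpre hd
  obtain ⟨ha, hb⟩ := main_diff matrix hpre hd
  rw [ha, hb]
  decide
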